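-- pv_equiv track=rewrite | github.com/krdnzebrar/CMPE150-Projects | Image Processing/src/Main.py | sort_rows_border
-- ===== SOURCE A (Python) =====
-- def sort_rows_border(matrix):
--     height = len(matrix)
--     width = len(matrix[0])
--     result = [[0] * width for i in range(height)]
--     for r in range(height):
--         row = []
--         till0 = []
--         c = 0
--         while c < width:
--             if matrix[r][c] == 0:
--                 if len(till0) > 0:
--                     till0.sort()
--                     row.extend(till0)
--                     till0 = []
--                 row.append(0)
--                 c += 1
--             else:
--                 till0.append(matrix[r][c])
--                 c += 1
--         if len(till0) > 0:
--             till0.sort()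
--             row.extend(till0)
--         result[r] = row
--     return result
-- ===== SOURCE B (Python) =====
-- def sort_rows_border(matrix):
--     width = len(matrix[0])
--
--     def fix(vals):
--         if 0 in vals:
--             z = vals.index(0)
--             return sorted(vals[:z]) + [0] + fix(vals[z + 1:])
--         return sorted(vals)
--
--     return [fix(row[:width]) for row in matrix]
-- ===== Notes on version B (the rewrite author's own statement) =====
-- stated objective: simpler
-- what changed: A walks each row index-by-index with a pending-segment accumulator flushed at zeros; B recursively splits the row at the first zero (index/slice) and returns sorted(prefix) + [0] + fix(rest), sorting the whole row when no zero remains.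
import Mathlib
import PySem

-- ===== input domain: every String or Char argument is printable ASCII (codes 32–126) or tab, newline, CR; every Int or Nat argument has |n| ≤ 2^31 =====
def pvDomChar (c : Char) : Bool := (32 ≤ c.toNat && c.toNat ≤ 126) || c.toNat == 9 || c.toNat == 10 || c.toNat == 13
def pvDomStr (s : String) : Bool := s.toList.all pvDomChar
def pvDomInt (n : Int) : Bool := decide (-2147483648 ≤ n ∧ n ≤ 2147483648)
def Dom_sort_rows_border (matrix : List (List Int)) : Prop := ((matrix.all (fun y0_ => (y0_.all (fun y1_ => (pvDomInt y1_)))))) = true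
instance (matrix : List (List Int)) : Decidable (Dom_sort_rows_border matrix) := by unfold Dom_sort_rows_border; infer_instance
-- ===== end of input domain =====

-- B replaces A's index walk + pending-segment accumulator by a recursive split of each row
-- at its first zero (sorted(prefix) + [0] + fix(rest)); objective: simpler. Return-value equivalence only.

-- ===== PORT A =====
-- A's inner 'while c < width' loop over one row, with its 'row'/'till0' accumulators.
def sortRowsLoopA (rowr : List Int) (width c : Nat) (row till0 : List Int) : List Int :=
  if c < width then
    if PySem.List.pyGetD rowr (c : Int) 0 = 0 then
      sortRowsLoopA rowr width (c + 1)
        ((if 0 < till0.length then row ++ PySem.List.sorted till0 (fun x => x) false else row) ++ [0]) []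
    else
      sortRowsLoopA rowr width (c + 1) row (till0 ++ [PySem.List.pyGetD rowr (c : Int) 0])
  else
    if 0 < till0.length then row ++ PySem.List.sorted till0 (fun x => x) false else row
termination_by width - c

-- 'result[r] = row' for every r in range(height): the result is the list of per-row loop results.
def sort_rows_border (matrix : List (List Int)) : List (List Int) :=
  (PySem.List.pyRange 0 (matrix.length : Int) 1).map
    (fun r => sortRowsLoopA (PySem.List.pyGetD matrix r [])
      (PySem.List.pyGetD matrix 0 []).length 0 [] [])

-- ===== PORT B =====
-- fix(vals): split at the first zero, sort the zero-free prefix, recurse on the rest.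
-- (fuel = vals.length is only a totality guard: each recursive call strictly shortens vals.)
def fixBGo (fuel : Nat) (vals : List Int) : List Int :=
  match fuel with
  | 0 => []
  | fuel + 1 =>
    match PySem.List.index? vals 0 with
    | none => PySem.List.sorted vals (fun x => x) false
    | some z =>
        PySem.List.sorted (PySem.List.slice vals none (some (z : Int))) (fun x => x) false
          ++ [0] ++ fixBGo fuel (PySem.List.slice vals (some ((z : Int) + 1)) none)

def fixB (vals : List Int) : List Int := fixBGo (vals.length + 1) vals

def sort_rows_border_alt (matrix : List (List Int)) : List (List Int) :=
  matrix.map (fun row =>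
    fixB (PySem.List.slice row none (some ((PySem.List.pyGetD matrix 0 []).length : Int))))

-- ===== PRECONDITION & SPEC =====
-- Pre_ excludes exactly the inputs where A raises IndexError: the empty matrix (matrix[0]) and
-- matrices with a row shorter than the first row (matrix[r][c] for c < width).
def Pre_sort_rows_border (matrix : List (List Int)) : Prop :=
  matrix ≠ [] ∧ ∀ row ∈ matrix, (matrix.headD []).length ≤ row.length
instance (matrix : List (List Int)) : Decidable (Pre_sort_rows_border matrix) := by
  unfold Pre_sort_rows_border; infer_instance

def pvWitness_sort_rows_border : List (List Int) := [[3, 1, 0, 2], [0, 5, 4, 1]]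

def Spec_sort_rows_border (matrix : List (List Int)) (out : List (List Int)) : Prop :=
  out = sort_rows_border_alt matrix
instance (matrix : List (List Int)) (out : List (List Int)) : Decidable (Spec_sort_rows_border matrix out) := by
  unfold Spec_sort_rows_border; infer_instance

-- ===== CLAIM (what is proved, stated in full; the proofs are below) =====
def Claim_equal_sort_rows_border : Prop := ∀ (matrix : List (List Int)), Dom_sort_rows_border matrix → Pre_sort_rows_border matrix → Spec_sort_rows_border matrix (sort_rows_border matrix)

-- ===== LEMMAS AND PROOFS =====

-- canonical list-structural form of A's row loop
def aList : List Int → List Int → List Int → List Int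
  | [], row, till0 => if 0 < till0.length then row ++ PySem.List.sorted till0 (fun x => x) false else row
  | v :: vs, row, till0 =>
      if v = 0 then
        aList vs ((if 0 < till0.length then row ++ PySem.List.sorted till0 (fun x => x) false else row) ++ [0]) []
      else aList vs row (till0 ++ [v])

lemma sorted_nil_id : PySem.List.sorted ([] : List Int) (fun x => x) false = [] := rfl

lemma sortRowsLoopA_eq_aList (rowr : List Int) (width : Nat) (hw : width ≤ rowr.length) :
    ∀ c row till0, c ≤ width →
      sortRowsLoopA rowr width c row till0 = aList ((rowr.take width).drop c) row till0 := by
  intro c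
  induction hn : width - c using Nat.strong_induction_on generalizing c with
  | _ n ih =>
    intro row till0 hc
    rw [sortRowsLoopA]
    by_cases h : c < width
    · have hlt : c < (rowr.take width).length := by simp; omega
      have hdrop : (rowr.take width).drop c = rowr[c] :: (rowr.take width).drop (c + 1) := by
        rw [List.drop_eq_getElem_cons hlt, List.getElem_take]
      have hget : PySem.List.pyGetD rowr (c : Int) 0 = rowr[c]'(by omega) := by
        rw [PySem.List.pyGetD_natCast]
        exact List.getD_eq_getElem rowr 0 (by omega)
      rw [if_pos h, hget, hdrop]
      by_cases hv : rowr[c] = (0 : Int)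
      · rw [if_pos hv, ih (width - (c+1)) (by omega) (c+1) rfl _ _ (by omega)]
        simp only [aList, if_pos hv]
      · rw [if_neg hv, ih (width - (c+1)) (by omega) (c+1) rfl _ _ (by omega)]
        simp only [aList, if_neg hv]
    · have hcw : c = width := by omega
      subst hcw
      rw [if_neg h, List.drop_eq_nil_of_le (by simp)]
      simp [aList]

lemma aList_append (vs : List Int) : ∀ till0 row,
    aList vs row till0 = row ++ aList vs [] till0 := by
  induction vs with
  | nil => intro t row; simp only [aList]; split_ifs <;> simp
  | cons v vs ih =>
    intro t row
    by_cases hv : v = 0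
    · simp only [aList, if_pos hv]
      conv_lhs => rw [ih]
      conv_rhs => rw [ih]
      split_ifs <;> simp
    · simp only [aList, if_neg hv]
      exact ih _ _

lemma aList_no_zero (vs : List Int) : ∀ t, (0 : Int) ∉ vs →
    aList vs [] t = PySem.List.sorted (t ++ vs) (fun x => x) false := by
  induction vs with
  | nil =>
    intro t _
    simp only [aList, List.append_nil]
    split_ifs with h
    · rfl
    · have ht : t = [] := by cases t <;> simp_all
      rw [ht, sorted_nil_id]
  | cons v vs ih =>
    intro t hnz
    have hv : v ≠ 0 := by intro h; exact hnz (h ▸ List.mem_cons_self)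
    simp only [aList, if_neg hv]
    rw [ih (t ++ [v]) (fun h => hnz (List.mem_cons_of_mem _ h))]
    simp

lemma aList_split (p : List Int) : ∀ (t rest : List Int), (0 : Int) ∉ p →
    aList (p ++ 0 :: rest) [] t =
      PySem.List.sorted (t ++ p) (fun x => x) false ++ [0] ++ aList rest [] [] := by
  induction p with
  | nil =>
    intro t rest _
    rw [List.nil_append, List.append_nil,
      show aList ((0 : Int) :: rest) [] t =
        aList rest ((if 0 < t.length then PySem.List.sorted t (fun x => x) false else []) ++ [0]) []
        from by simp [aList]]
    rw [aList_append]
    by_cases h : 0 < t.length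
    · simp [h]
    · have ht : t = [] := by cases t <;> simp_all
      subst ht
      simp [sorted_nil_id]
  | cons v p ih =>
    intro t rest hnz
    have hv : v ≠ 0 := by intro h; exact hnz (h ▸ List.mem_cons_self)
    simp only [List.cons_append, aList, if_neg hv]
    rw [ih (t ++ [v]) rest (fun h => hnz (List.mem_cons_of_mem _ h))]
    simp

lemma fixBGo_eq_aList (fuel : Nat) : ∀ vals : List Int, vals.length < fuel →
    fixBGo fuel vals = aList vals [] [] := by
  induction fuel with
  | zero => intro vals h; omega
  | succ fuel ih =>
    intro vals hlen
    rw [fixBGo]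
    cases h : PySem.List.index? vals 0 with
    | none =>
      have hnz : (0 : Int) ∉ vals := (PySem.List.index?_eq_none_iff vals 0).mp h
      rw [aList_no_zero vals [] hnz]
      simp
    | some z =>
      obtain ⟨p, suf, hvals, hlen', hnz⟩ := (PySem.List.index?_eq_some_iff vals 0 z).mp h
      have htake : PySem.List.slice vals none (some (z : Int)) = p := by
        rw [PySem.List.slice_to vals (by omega)]
        simp only [Int.toNat_natCast, hvals, ← hlen']
        exact List.take_left
      have hdrop : PySem.List.slice vals (some ((z : Int) + 1)) none = suf := by
        rw [PySem.List.slice_from vals (by omega)]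
        have h1 : ((z : Int) + 1).toNat = z + 1 := by omega
        rw [h1, hvals, ← hlen',
          show p.length + 1 = (p ++ [(0 : Int)]).length by simp,
          show p ++ (0 : Int) :: suf = (p ++ [(0 : Int)]) ++ suf by simp]
        exact List.drop_left
      show PySem.List.sorted (PySem.List.slice vals none (some (z : Int))) (fun x => x) false
            ++ [0] ++ fixBGo fuel (PySem.List.slice vals (some ((z : Int) + 1)) none) = aList vals [] []
      rw [htake, hdrop]
      rw [ih suf (by subst hvals; simp at hlen; omega)]
      rw [hvals, aList_split p [] suf hnz]
      simp

-- per-row agreement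
lemma row_agree (rowr : List Int) (width : Nat) (hw : width ≤ rowr.length) :
    sortRowsLoopA rowr width 0 [] [] = fixB (PySem.List.slice rowr none (some (width : Int))) := by
  rw [sortRowsLoopA_eq_aList rowr width hw 0 [] [] (by omega)]
  rw [PySem.List.slice_to rowr (by omega)]
  unfold fixB
  rw [fixBGo_eq_aList _ _ (by omega)]
  simp

-- ===== VERDICT (by name: the statement is the Claim_ definition above) =====
theorem sort_rows_border_spec : Claim_equal_sort_rows_border := by
  intro matrix _ hpre
  obtain ⟨hne, hall⟩ := hpre
  unfold Spec_sort_rows_border sort_rows_border sort_rows_border_alt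
  rw [show (fun r => sortRowsLoopA (PySem.List.pyGetD matrix r [])
        (PySem.List.pyGetD matrix 0 []).length 0 [] []) =
      ((fun rowr => sortRowsLoopA rowr (PySem.List.pyGetD matrix 0 []).length 0 [] []) ∘
        (fun r => PySem.List.pyGetD matrix r [])) from rfl]
  rw [← List.map_map, PySem.List.map_pyGetD_pyRange_zero']
  apply List.map_congr_left
  intro row hrow
  have hw : (PySem.List.pyGetD matrix 0 []).length ≤ row.length := by
    have h0 : PySem.List.pyGetD matrix 0 [] = matrix.headD [] := by
      cases matrix with
      | nil => simp at hne
      | cons a t => exact PySem.List.pyGetD_zero_cons a t []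
    rw [h0]; exact hall row hrow
  exact row_agree row _ hw
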